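-- pv_equiv track=rewrite | github.com/rnegrin90/AdventOfCode2017 | Day24/day24.py | get_strongest
-- ===== SOURCE A (Python) =====
-- def get_current_strengh(bridge):
--     result = 0
--     for tube in bridge:
--         result += tube[0]
--         result += tube[1]
--     return result
--
-- def get_strongest(bridge, available_tubes, last_connection):
--     possible = list(filter(lambda t: last_connection in t, available_tubes))
--     path_strenghts = list()
--     if len(possible) > 0:
--         for tube in possible:
--             c = list(tube)
--             c.remove(last_connection)
--             asdf = list(bridge)
--             asdf.append(tube)
--             qwer = list(available_tubes)
--             qwer.remove(tube)
--             path_strenghts.append(get_strongest(asdf, qwer, c[0]))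
--     else:
--         path_strenghts.append(get_current_strengh(bridge))
--     return max(path_strenghts)
-- ===== SOURCE B (Python) =====
-- def get_strongest(bridge, available_tubes, last_connection):
--     start = 0
--     for t in bridge:
--         start += t[0] + t[1]
--     best = None
--     stack = [(start, available_tubes, last_connection)]
--     while stack:
--         (s, rem, port), stack = stack[0], stack[1:]
--         matches = [t for t in rem if port in t]
--         if matches:
--             children = []
--             for t in matches:
--                 nxt = list(rem)
--                 nxt.remove(t)
--                 children.append((s + t[0] + t[1], nxt, t[1] if t[0] == port else t[0]))
--             stack = children + stack
--         else:
--             best = s if best is None else max(best, s)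
--     return best
-- ===== Notes on version B (the rewrite author's own statement) =====
-- stated objective: alternative
-- what changed: A's top-down recursion that rebuilds the bridge list at every step and re-sums it at each leaf is replaced by an iterative DFS over an explicit stack of (partial strength, remaining tubes, open port) states with a running maximum, so strengths are accumulated incrementally and no bridge list is carried at all.
import Mathlib
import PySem

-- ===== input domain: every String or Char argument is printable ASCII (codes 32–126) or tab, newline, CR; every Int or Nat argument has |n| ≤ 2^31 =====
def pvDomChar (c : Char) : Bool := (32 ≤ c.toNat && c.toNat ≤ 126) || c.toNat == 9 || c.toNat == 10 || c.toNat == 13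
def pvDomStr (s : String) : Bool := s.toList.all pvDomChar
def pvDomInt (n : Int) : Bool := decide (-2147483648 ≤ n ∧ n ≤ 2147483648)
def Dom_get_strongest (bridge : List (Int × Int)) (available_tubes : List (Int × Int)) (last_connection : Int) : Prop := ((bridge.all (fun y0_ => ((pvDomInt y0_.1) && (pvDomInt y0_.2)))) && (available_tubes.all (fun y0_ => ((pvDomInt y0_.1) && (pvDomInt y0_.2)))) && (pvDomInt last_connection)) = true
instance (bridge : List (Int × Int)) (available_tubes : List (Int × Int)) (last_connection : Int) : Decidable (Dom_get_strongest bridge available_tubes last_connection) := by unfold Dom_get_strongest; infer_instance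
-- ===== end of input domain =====

-- B replaces A's recursion (which re-walks the whole bridge at every leaf) by an iterative DFS over an
-- explicit stack of (partial strength, remaining tubes, open port) states with a running maximum: alternative decomposition.
-- Neither implementation mutates the caller's lists.

-- ===== PORT A =====
def get_current_strengh (bridge : List (Int × Int)) : Int :=
  bridge.foldl (fun result tube => result + tube.1 + tube.2) 0

-- `last_connection in t` on a pair = equality with either component; `c.remove`/`qwer.remove` remove the
-- first equal occurrence (List.erase); Python's `max(path_strenghts)` is PySem.List.max?, and the list is
-- nonempty in both branches so `.getD 0` only discharges the Option.  `possible` is bound once in Python;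
-- it is repeated here textually, same value.
def get_strongest (bridge : List (Int × Int)) (available_tubes : List (Int × Int)) (last_connection : Int) : Int :=
  if 0 < ((available_tubes.filter (fun t => last_connection == t.1 || last_connection == t.2)).length) then
    (PySem.List.max?
      ((available_tubes.filter (fun t => last_connection == t.1 || last_connection == t.2)).attach.map
        (fun tp =>
          get_strongest (bridge ++ [tp.1]) (available_tubes.erase tp.1)
            (if tp.1.1 == last_connection then tp.1.2 else tp.1.1)))
      (fun y => y)).getD 0
  else get_current_strengh bridge
termination_by available_tubes.length
decreasing_by
  have hm : tp.1 ∈ available_tubes := List.mem_of_mem_filter tp.2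
  have := List.length_erase_of_mem hm
  have : 0 < available_tubes.length := List.length_pos_of_mem hm
  omega

-- ===== PORT B =====
-- termination measure for the DFS stack: a state whose remaining list has length n counts (n+1)!
def pvMeas (stack : List (Int × List (Int × Int) × Int)) : Nat :=
  (stack.map (fun st => Nat.factorial (st.2.1.length + 1))).sum

-- the `while stack:` loop of Source B; head of the list = front of the stack
def get_strongest_loop (stack : List (Int × List (Int × Int) × Int)) (best : Option Int) : Option Int :=
  match stack with
  | [] => best
  | (s, rem, port) :: rest =>
    if (rem.filter (fun t => port == t.1 || port == t.2)) = [] then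
      get_strongest_loop rest (some (match best with | none => s | some b => max b s))
    else
      get_strongest_loop
        (((rem.filter (fun t => port == t.1 || port == t.2)).attach.map
            (fun tp => (s + tp.1.1 + tp.1.2, rem.erase tp.1,
                        if tp.1.1 == port then tp.1.2 else tp.1.1))) ++ rest)
        best
termination_by pvMeas stack
decreasing_by
  · simp [pvMeas]
    have := Nat.factorial_pos (rem.length + 1)
    omega
  · simp only [pvMeas, List.map_append, List.sum_append, List.map_cons, List.sum_cons]
    refine Nat.add_lt_add_right ?_ _
    refine lt_of_le_of_lt (List.sum_le_card_nsmul _ (Nat.factorial rem.length) ?_) ?_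
    · intro x hx
      simp only [List.map_map, List.mem_map, List.mem_attach, true_and] at hx
      obtain ⟨tp, rfl⟩ := hx
      have hm : tp.1 ∈ rem := List.mem_of_mem_filter tp.2
      have h1 := List.length_erase_of_mem hm
      have h2 : 0 < rem.length := List.length_pos_of_mem hm
      simp only [Function.comp]
      rw [h1]
      have he : rem.length - 1 + 1 = rem.length := by omega
      rw [he]
    · simp only [List.length_map, List.length_attach, smul_eq_mul]
      have hfl : (rem.filter (fun t => port == t.1 || port == t.2)).length ≤ rem.length :=
        List.length_filter_le _ _
      rw [Nat.factorial_succ]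
      exact Nat.mul_lt_mul_of_lt_of_le (by omega) le_rfl (Nat.factorial_pos _)

def get_strongest_alt (bridge : List (Int × Int)) (available_tubes : List (Int × Int)) (last_connection : Int) : Int :=
  -- `.getD 0` only discharges the Option: the loop always reaches a dead end, so best is some at return
  (get_strongest_loop
      [(bridge.foldl (fun start t => start + t.1 + t.2) 0, available_tubes, last_connection)]
      none).getD 0

-- ===== PRECONDITION & SPEC =====
def Spec_get_strongest (bridge : List (Int × Int)) (available_tubes : List (Int × Int)) (last_connection : Int) (out : Int) : Prop := out = get_strongest_alt bridge available_tubes last_connection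
instance (bridge : List (Int × Int)) (available_tubes : List (Int × Int)) (last_connection : Int) (out : Int) : Decidable (Spec_get_strongest bridge available_tubes last_connection out) := by unfold Spec_get_strongest; infer_instance

-- ===== CLAIM (what is proved, stated in full; the proofs are below) =====
def Claim_equal_get_strongest : Prop := ∀ (bridge : List (Int × Int)) (available_tubes : List (Int × Int)) (last_connection : Int), Dom_get_strongest bridge available_tubes last_connection → Spec_get_strongest bridge available_tubes last_connection (get_strongest bridge available_tubes last_connection)

-- ===== LEMMAS AND PROOFS =====

-- running-maximum step of the loop, as a function
def pvObmax (best : Option Int) (x : Int) : Option Int :=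
  some (match best with | none => x | some b => max b x)

-- merge of two optional maxima
def pvOmax (a b : Option Int) : Option Int :=
  match a, b with
  | none, b => b
  | some a, none => some a
  | some a, some b => some (max a b)

theorem pvObmax_eq (a : Option Int) (x : Int) : pvObmax a x = pvOmax a (some x) := by
  cases a <;> rfl

theorem pvOmax_assoc (a b c : Option Int) : pvOmax (pvOmax a b) c = pvOmax a (pvOmax b c) := by
  cases a <;> cases b <;> cases c <;> simp [pvOmax, max_assoc]

theorem foldl_pvObmax_some (t : List Int) : ∀ m : Int,
    List.foldl pvObmax (some m) t = some (t.foldl max m) := by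
  induction t with
  | nil => intro m; rfl
  | cons x t ih => intro m; simpa [pvObmax] using ih (max m x)

theorem foldl_max_shift (t : List Int) : ∀ c m : Int,
    (t.map (fun y => c + y)).foldl max (c + m) = c + t.foldl max m := by
  induction t with
  | nil => intro c m; rfl
  | cons x t ih =>
    intro c m
    simp only [List.map_cons, List.foldl_cons]
    rw [max_add_add_left]
    exact ih c (max m x)

theorem foldl_pvObmax_split (xs : List Int) : ∀ p q : Option Int,
    List.foldl pvObmax (pvOmax p q) xs = pvOmax p (List.foldl pvObmax q xs) := by
  induction xs with
  | nil => intro p q; rfl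
  | cons x xs ih =>
    intro p q
    simp only [List.foldl_cons]
    rw [pvObmax_eq, pvObmax_eq, pvOmax_assoc]
    exact ih p (pvOmax q (some x))

-- Python max of a nonempty list (shifted by c) versus the running max
theorem maxD_shift (c x : Int) (t : List Int) :
    (PySem.List.max? ((x :: t).map (fun y => c + y)) (fun y => y)).getD 0
      = c + (PySem.List.max? (x :: t) (fun y => y)).getD 0 := by
  simp only [List.map_cons, PySem.List.max?_id_cons, Option.getD_some]
  exact foldl_max_shift t c x

-- A's recursion splits as (strength of the bridge so far) + (value of the search from scratch)
theorem gs_offset_aux : ∀ (n : Nat) (avail : List (Int × Int)), avail.length ≤ n →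
    ∀ (bridge : List (Int × Int)) (last : Int),
      get_strongest bridge avail last
        = get_current_strengh bridge + get_strongest [] avail last := by
  intro n
  induction n with
  | zero =>
    intro avail hlen bridge last
    have : avail = [] := List.eq_nil_of_length_eq_zero (by omega)
    subst this
    rw [get_strongest, get_strongest]
    simp [get_current_strengh]
  | succ n ih =>
    intro avail hlen bridge last
    rw [get_strongest, get_strongest]
    by_cases hpos : 0 < ((avail.filter (fun t => last == t.1 || last == t.2)).length)
    · simp only [if_pos hpos]
      have herase : ∀ tp : {x // x ∈ avail.filter (fun t => last == t.1 || last == t.2)},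
          (avail.erase tp.1).length ≤ n := by
        intro tp
        have hm : tp.1 ∈ avail := List.mem_of_mem_filter tp.2
        have := List.length_erase_of_mem hm
        have := List.length_pos_of_mem hm
        omega
      have hmapA :
          (avail.filter (fun t => last == t.1 || last == t.2)).attach.map
            (fun tp => get_strongest (bridge ++ [tp.1]) (avail.erase tp.1)
              (if tp.1.1 == last then tp.1.2 else tp.1.1))
          = ((avail.filter (fun t => last == t.1 || last == t.2)).attach.map
              (fun tp => get_strongest ([] ++ [tp.1]) (avail.erase tp.1)
                (if tp.1.1 == last then tp.1.2 else tp.1.1))).map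
              (fun y => get_current_strengh bridge + y) := by
        rw [List.map_map]
        apply List.map_congr_left
        intro tp _
        have h1 := ih (avail.erase tp.1) (herase tp) (bridge ++ [tp.1])
          (if tp.1.1 == last then tp.1.2 else tp.1.1)
        have h2 := ih (avail.erase tp.1) (herase tp) ([] ++ [tp.1])
          (if tp.1.1 == last then tp.1.2 else tp.1.1)
        simp only [Function.comp]
        rw [h1, h2]
        simp [get_current_strengh, List.foldl_append]
        ring
      rw [hmapA]
      obtain ⟨x, t, hxt⟩ : ∃ x t, ((avail.filter (fun t => last == t.1 || last == t.2)).attach.map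
          (fun tp => get_strongest ([] ++ [tp.1]) (avail.erase tp.1)
            (if tp.1.1 == last then tp.1.2 else tp.1.1))) = x :: t := by
        have : (avail.filter (fun t => last == t.1 || last == t.2)).attach ≠ [] := by
          intro hnil
          have := List.length_attach (l := avail.filter (fun t => last == t.1 || last == t.2))
          rw [hnil] at this
          simp at this
          omega
        obtain ⟨y, ys, hc⟩ := List.exists_cons_of_ne_nil this
        exact ⟨_, _, by rw [hc, List.map_cons]⟩
      rw [hxt]
      exact maxD_shift (get_current_strengh bridge) x t
    · simp only [if_neg hpos]
      simp [get_current_strengh]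

theorem gs_offset (avail : List (Int × Int)) (bridge : List (Int × Int)) (last : Int) :
    get_strongest bridge avail last
      = get_current_strengh bridge + get_strongest [] avail last :=
  gs_offset_aux avail.length avail le_rfl bridge last

-- value of a DFS state: its partial strength plus the best completion from its remaining tubes
def pvStVal (st : Int × List (Int × Int) × Int) : Int :=
  st.1 + get_strongest [] st.2.1 st.2.2

-- the loop folds the running maximum of the state values over the stack
theorem loop_eq : ∀ (stack : List (Int × List (Int × Int) × Int)) (best : Option Int),
    get_strongest_loop stack best
      = List.foldl (fun a st => pvObmax a (pvStVal st)) best stack := by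
  intro stack best
  induction stack, best using get_strongest_loop.induct with
  | case1 best => rw [get_strongest_loop.eq_def]; rfl
  | case2 best s rem port rest hf ih =>
    have hf' : rem.filter (fun t => port == t.1 || port == t.2) = [] := by
      simpa only [List.unattach_filter, List.unattach_attach] using hf
    rw [get_strongest_loop.eq_def]
    simp only [if_pos hf']
    rw [ih]
    simp only [List.foldl_cons]
    congr 1
    have hG : get_strongest [] rem port = 0 := by
      rw [get_strongest]
      rw [hf']
      simp [get_current_strengh]
    simp [pvObmax, pvStVal, hG]
  | case3 best s rem port rest hf ih =>
    have hf' : ¬ rem.filter (fun t => port == t.1 || port == t.2) = [] := by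
      simpa only [List.unattach_filter, List.unattach_attach] using hf
    rw [get_strongest_loop.eq_def]
    simp only [if_neg hf']
    simp only [dite_eq_ite] at ih
    rw [ih]
    rw [List.foldl_append, List.foldl_cons]
    congr 1
    -- fold over the children equals one running-max step with this node's value
    rw [List.foldl_map]
    have hcongr :
        (fun (a : Option Int) tp => pvObmax a (pvStVal
            ((fun tp : {x // x ∈ rem.filter (fun t => port == t.1 || port == t.2)} =>
              (s + tp.1.1 + tp.1.2, rem.erase tp.1,
               if tp.1.1 == port then tp.1.2 else tp.1.1)) tp)))
          = (fun (a : Option Int) tp => pvObmax a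
              (s + get_strongest ([] ++ [tp.1]) (rem.erase tp.1)
                (if tp.1.1 == port then tp.1.2 else tp.1.1))) := by
      funext a tp
      congr 1
      simp only [pvStVal]
      rw [gs_offset (rem.erase tp.1) ([] ++ [tp.1])]
      simp only [get_current_strengh, List.nil_append, List.foldl_cons, List.foldl_nil]
      ring
    rw [hcongr]
    have hG : pvStVal (s, rem, port)
        = s + (PySem.List.max?
            ((rem.filter (fun t => port == t.1 || port == t.2)).attach.map
              (fun tp => get_strongest ([] ++ [tp.1]) (rem.erase tp.1)
                (if tp.1.1 == port then tp.1.2 else tp.1.1)))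
            (fun y => y)).getD 0 := by
      simp only [pvStVal]
      congr 1
      rw [get_strongest]
      have hpos : 0 < ((rem.filter (fun t => port == t.1 || port == t.2)).length) :=
        List.length_pos_of_ne_nil hf'
      rw [if_pos hpos]
    rw [hG]
    obtain ⟨x, t, hxt⟩ : ∃ x t, ((rem.filter (fun t => port == t.1 || port == t.2)).attach.map
        (fun tp => get_strongest ([] ++ [tp.1]) (rem.erase tp.1)
          (if tp.1.1 == port then tp.1.2 else tp.1.1))) = x :: t := by
      have hne : (rem.filter (fun t => port == t.1 || port == t.2)).attach ≠ [] := by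
        have hpos := List.length_pos_of_ne_nil hf'
        intro hnil
        have h0 : (rem.filter (fun t => port == t.1 || port == t.2)).attach.length = 0 := by
          rw [hnil]; rfl
        rw [List.length_attach] at h0
        omega
      obtain ⟨y, ys, hc⟩ := List.exists_cons_of_ne_nil hne
      exact ⟨_, _, by rw [hc, List.map_cons]⟩
    have hfold : (rem.filter (fun t => port == t.1 || port == t.2)).attach.foldl
        (fun (a : Option Int) tp => pvObmax a
          (s + get_strongest ([] ++ [tp.1]) (rem.erase tp.1)
            (if tp.1.1 == port then tp.1.2 else tp.1.1))) best
        = List.foldl pvObmax best (((rem.filter (fun t => port == t.1 || port == t.2)).attach.map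
            (fun tp => get_strongest ([] ++ [tp.1]) (rem.erase tp.1)
              (if tp.1.1 == port then tp.1.2 else tp.1.1))).map (fun y => s + y)) := by
      rw [List.map_map, List.foldl_map]
      rfl
    rw [hfold, hxt]
    simp only [List.map_cons, List.foldl_cons]
    rw [pvObmax_eq]
    rw [foldl_pvObmax_split, foldl_pvObmax_some, foldl_max_shift]
    rw [pvObmax_eq]
    simp only [PySem.List.max?_id_cons, Option.getD_some]

-- ===== VERDICT (by name: the statement is the Claim_ definition above) =====
theorem get_strongest_spec : Claim_equal_get_strongest := by
  intro bridge avail last _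
  unfold Spec_get_strongest get_strongest_alt
  rw [loop_eq]
  simp only [List.foldl_cons, List.foldl_nil]
  rw [pvObmax_eq]
  show get_strongest bridge avail last
    = (pvOmax none (some (pvStVal (get_current_strengh bridge, avail, last)))).getD 0
  simp only [pvOmax, Option.getD_some, pvStVal]
  exact gs_offset avail bridge last
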